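-- pv_equiv track=rewrite | github.com/jhultberg/AoC2020 | aoc/day17.py | active_neighbors_4
-- ===== SOURCE A (Python) =====
-- def active_neighbors_4(state, coord):
--     neighbors =0
--     for pos in state:
--         if pos[0] in range(coord[0] -1, coord[0]+2) and pos[1] in range(coord[1] -1, coord[1]+2) and pos[2] in range(coord[2] -1, coord[2]+2) and pos[3] in range(coord[3] -1, coord[3]+2):
--             if pos[0] == coord[0] and pos[1] == coord[1] and pos[2] == coord[2] and pos[3] == coord[3]:
--                 continue
--             if state[pos]:
--                 neighbors += 1
--     return neighbors
-- ===== SOURCE B (Python) =====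
-- _OFFSETS = [(dx, dy, dz, dw)
--             for dx in (-1, 0, 1)
--             for dy in (-1, 0, 1)
--             for dz in (-1, 0, 1)
--             for dw in (-1, 0, 1)
--             if (dx, dy, dz, dw) != (0, 0, 0, 0)]
--
--
-- def active_neighbors_4(state, coord):
--     n = 0
--     for off in _OFFSETS:
--         if state.get(tuple(c + d for c, d in zip(coord, off))):
--             n += 1
--     return n
-- ===== Notes on version B (the rewrite author's own statement) =====
-- stated objective: alternative
-- what changed: Instead of scanning every cell in the state and range-testing it against the 3^4 box around coord, B enumerates the 80 fixed neighbor offsets and does one direct dict lookup per offset (constant lookups vs a full scan; not measurably faster on the timed inputs); Pre_ keeps A's raise-free domain except keys longer than 4 whose first four components lie in the box (A counts them, B's 4-component lookup cannot) and duplicate association-list keys (no Python-dict counterpart).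
-- outside the precondition, e.g. on active_neighbors_4({(0, 0, 0, 1, 5): True}, (0, 0, 0, 0)): A returns 1, B returns 0
import Mathlib
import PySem

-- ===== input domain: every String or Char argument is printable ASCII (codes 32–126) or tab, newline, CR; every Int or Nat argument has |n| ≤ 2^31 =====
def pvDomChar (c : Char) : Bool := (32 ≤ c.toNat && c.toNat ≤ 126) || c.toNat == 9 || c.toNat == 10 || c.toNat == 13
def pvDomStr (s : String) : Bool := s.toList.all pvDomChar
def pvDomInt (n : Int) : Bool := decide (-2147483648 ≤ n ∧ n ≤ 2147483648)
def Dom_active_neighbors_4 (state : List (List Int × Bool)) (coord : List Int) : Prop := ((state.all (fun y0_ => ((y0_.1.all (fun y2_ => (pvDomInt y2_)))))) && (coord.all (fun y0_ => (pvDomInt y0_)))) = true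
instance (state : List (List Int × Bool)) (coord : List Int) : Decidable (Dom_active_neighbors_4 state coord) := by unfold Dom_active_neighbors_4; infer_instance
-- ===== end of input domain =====

-- B replaces A's scan of the whole state (range tests per cell) by 80 direct neighbor-key lookups.

-- ===== PORT A =====
-- xs[i]; where Python raises IndexError pyGet? is none (such inputs are excluded by Pre_, so the
-- .getD 0 default is never semantically relevant there)
def anGet (xs : List Int) (i : Int) : Int := (PySem.List.pyGet? xs i).getD 0

-- 'for pos in state' iterates the dict's keys; 'pos[k] in range(c-1, c+2)' is c-1 ≤ pos[k] < c+2; 'state[pos]' is a dict lookup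
def active_neighbors_4 (state : List (List Int × Bool)) (coord : List Int) : Int :=
  state.foldl
    (fun neighbors pos =>
      if anGet coord 0 - 1 ≤ anGet pos.1 0 ∧ anGet pos.1 0 < anGet coord 0 + 2 ∧
         anGet coord 1 - 1 ≤ anGet pos.1 1 ∧ anGet pos.1 1 < anGet coord 1 + 2 ∧
         anGet coord 2 - 1 ≤ anGet pos.1 2 ∧ anGet pos.1 2 < anGet coord 2 + 2 ∧
         anGet coord 3 - 1 ≤ anGet pos.1 3 ∧ anGet pos.1 3 < anGet coord 3 + 2 then
        if anGet pos.1 0 = anGet coord 0 ∧ anGet pos.1 1 = anGet coord 1 ∧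
           anGet pos.1 2 = anGet coord 2 ∧ anGet pos.1 3 = anGet coord 3 then neighbors
        else if ((PySem.Dict.mk state).get? pos.1).getD false then neighbors + 1
        else neighbors
      else neighbors)
    0

-- ===== PORT B =====
-- the _OFFSETS comprehension of Source B
def anOffsets : List (Int × Int × Int × Int) :=
  ([-1, 0, 1] : List Int).flatMap fun dx =>
  ([-1, 0, 1] : List Int).flatMap fun dy =>
  ([-1, 0, 1] : List Int).flatMap fun dz =>
  ([-1, 0, 1] : List Int).flatMap fun dw =>
  if (dx, dy, dz, dw) ≠ ((0 : Int), (0 : Int), (0 : Int), (0 : Int)) then [(dx, dy, dz, dw)] else []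

-- the counting loop of Source B: 'tuple(c + d for c, d in zip(coord, off))' is List.zipWith (· + ·),
-- 'state.get(key)' is the dict lookup with default, 'if …: n += 1' over the offsets is countP
def active_neighbors_4_alt (state : List (List Int × Bool)) (coord : List Int) : Int :=
  ((anOffsets.countP fun δ =>
      (PySem.Dict.mk state).getD (List.zipWith (· + ·) coord [δ.1, δ.2.1, δ.2.2.1, δ.2.2.2]) false : Nat) : Int)

-- ===== PRECONDITION & SPEC =====
-- coord[i]-1 ≤ key[i] ≤ coord[i]+1, the range test A applies at index i
def anInR (ks cs : List Int) (i : Nat) : Prop :=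
  cs.getD i 0 - 1 ≤ ks.getD i 0 ∧ ks.getD i 0 ≤ cs.getD i 0 + 1

-- Pre_ is A's raise-free domain minus two kinds of inputs A still returns on: keys LONGER than 4 whose
-- first four components all lie in the box around coord (A counts them, B's 4-component lookup cannot
-- see them), and duplicate association-list keys (no Python-dict counterpart). Every key must either be
-- a proper 4D key (with a 4D coord) or fail one of A's range tests at an index both lists have.
def Pre_active_neighbors_4 (state : List (List Int × Bool)) (coord : List Int) : Prop :=
  (∀ p ∈ state,
      (p.1.length = 4 ∧ 4 ≤ coord.length) ∨
      (∃ i < min (min p.1.length coord.length) 4, ¬ anInR p.1 coord i)) ∧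
  (state.map Prod.fst).Nodup
instance (state : List (List Int × Bool)) (coord : List Int) : Decidable (Pre_active_neighbors_4 state coord) := by unfold Pre_active_neighbors_4 anInR; infer_instance
def pvWitness_active_neighbors_4 : (List (List Int × Bool)) × List Int :=
  ([([0, 0, 0, 1], true), ([1, 1, 1, 1], false)], [0, 0, 0, 0])

def Spec_active_neighbors_4 (state : List (List Int × Bool)) (coord : List Int) (out : Int) : Prop := out = active_neighbors_4_alt state coord
instance (state : List (List Int × Bool)) (coord : List Int) (out : Int) : Decidable (Spec_active_neighbors_4 state coord out) := by unfold Spec_active_neighbors_4; infer_instance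

-- ===== CLAIM (what is proved, stated in full; the proofs are below) =====
def Claim_equal_active_neighbors_4 : Prop := ∀ (state : List (List Int × Bool)) (coord : List Int), Dom_active_neighbors_4 state coord → Pre_active_neighbors_4 state coord → Spec_active_neighbors_4 state coord (active_neighbors_4 state coord)

-- ===== LEMMAS AND PROOFS =====

-- the 80 neighbor keys of a 4D coord x::y::z::w
def nbrKeys (x y z w : Int) : List (List Int) :=
  anOffsets.map fun δ => [x + δ.1, y + δ.2.1, z + δ.2.2.1, w + δ.2.2.2]

-- anGet agrees with List.getD at the four indices A uses (both default when the list is short)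
theorem anGetD0 (xs : List Int) : anGet xs 0 = xs.getD 0 0 := by
  rw [anGet, PySem.List.pyGet?_of_nonneg xs (by norm_num), List.getD_eq_getElem?_getD]; rfl
theorem anGetD1 (xs : List Int) : anGet xs 1 = xs.getD 1 0 := by
  rw [anGet, PySem.List.pyGet?_of_nonneg xs (by norm_num), List.getD_eq_getElem?_getD]; rfl
theorem anGetD2 (xs : List Int) : anGet xs 2 = xs.getD 2 0 := by
  rw [anGet, PySem.List.pyGet?_of_nonneg xs (by norm_num), List.getD_eq_getElem?_getD]; rfl
theorem anGetD3 (xs : List Int) : anGet xs 3 = xs.getD 3 0 := by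
  rw [anGet, PySem.List.pyGet?_of_nonneg xs (by norm_num), List.getD_eq_getElem?_getD]; rfl

theorem zipWith_four (x y z w a b c d : Int) (r : List Int) :
    List.zipWith (· + ·) (x::y::z::w::r) [a, b, c, d] = [x + a, y + b, z + c, w + d] := by
  cases r <;> rfl

theorem mem_anOffsets (δ : Int × Int × Int × Int) :
    δ ∈ anOffsets ↔ ((δ.1 = -1 ∨ δ.1 = 0 ∨ δ.1 = 1) ∧ (δ.2.1 = -1 ∨ δ.2.1 = 0 ∨ δ.2.1 = 1) ∧
      (δ.2.2.1 = -1 ∨ δ.2.2.1 = 0 ∨ δ.2.2.1 = 1) ∧ (δ.2.2.2 = -1 ∨ δ.2.2.2 = 0 ∨ δ.2.2.2 = 1) ∧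
      δ ≠ (0, 0, 0, 0)) := by
  obtain ⟨a, b, c, d⟩ := δ
  simp only [anOffsets, List.mem_flatMap, List.mem_ite_nil_right, List.mem_singleton, Prod.mk.injEq]
  constructor
  · rintro ⟨dx, hdx, dy, hdy, dz, hdz, dw, hdw, hne, rfl, rfl, rfl, rfl⟩
    simp only [List.mem_cons, List.not_mem_nil, or_false] at hdx hdy hdz hdw
    exact ⟨hdx, hdy, hdz, hdw, hne⟩
  · rintro ⟨ha, hb, hc, hd, hne⟩
    refine ⟨a, ?_, b, ?_, c, ?_, d, ?_, hne, rfl, rfl, rfl, rfl⟩ <;>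
      simp only [List.mem_cons, List.not_mem_nil, or_false] <;> assumption

theorem nodup_anOffsets : anOffsets.Nodup := by decide

theorem mem_nbrKeys (x y z w k0 k1 k2 k3 : Int) :
    [k0, k1, k2, k3] ∈ nbrKeys x y z w ↔
      ((x - 1 ≤ k0 ∧ k0 < x + 2 ∧ y - 1 ≤ k1 ∧ k1 < y + 2 ∧ z - 1 ≤ k2 ∧ k2 < z + 2 ∧
        w - 1 ≤ k3 ∧ k3 < w + 2) ∧ ¬(k0 = x ∧ k1 = y ∧ k2 = z ∧ k3 = w)) := by
  simp only [nbrKeys, List.mem_map]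
  constructor
  · rintro ⟨⟨a, b, c, d⟩, hδ, heq⟩
    rw [mem_anOffsets] at hδ
    obtain ⟨ha, hb, hc, hd, hne⟩ := hδ
    simp only [ne_eq, Prod.mk.injEq] at hne ha hb hc hd
    simp only [List.cons.injEq, and_true] at heq
    obtain ⟨h0, h1, h2, h3⟩ := heq
    refine ⟨by omega, ?_⟩
    intro h
    exact hne ⟨by omega, by omega, by omega, by omega⟩
  · rintro ⟨hr, hne⟩
    refine ⟨(k0 - x, k1 - y, k2 - z, k3 - w), ?_, ?_⟩
    · simp only [mem_anOffsets, ne_eq, Prod.mk.injEq]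
      refine ⟨by omega, by omega, by omega, by omega, ?_⟩
      intro h
      exact hne ⟨by omega, by omega, by omega, by omega⟩
    · simp only [List.cons.injEq, and_true]
      exact ⟨by omega, by omega, by omega, by omega⟩

theorem nodup_nbrKeys (x y z w : Int) : (nbrKeys x y z w).Nodup := by
  apply nodup_anOffsets.map_on
  intro δ _ δ' _ h
  obtain ⟨a, b, c, d⟩ := δ; obtain ⟨a', b', c', d'⟩ := δ'
  simp only [List.cons.injEq, and_true] at h
  simp only [Prod.ext_iff]
  omega

-- a key that fails A's range test at a valid index is not a neighbor key
theorem not_mem_nbrKeys_of_oob (x y z w : Int) (r k : List Int) (i : Nat)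
    (hik : i < k.length) (hi4 : i < 4) (hoob : ¬ anInR k (x::y::z::w::r) i) :
    k ∉ nbrKeys x y z w := by
  intro hk
  obtain ⟨δ, hδ, heq⟩ := List.mem_map.mp hk
  rw [mem_anOffsets] at hδ
  obtain ⟨ha, hb, hc, hd, -⟩ := hδ
  subst heq
  apply hoob
  unfold anInR
  interval_cases i <;> simp only [List.getD] <;> simp <;> omega

-- the 8-conjunct range condition of port A is false at a failing valid index
theorem bigcond_false (cs ks : List Int) (i : Nat)
    (hik : i < ks.length) (hic : i < cs.length) (hi4 : i < 4) (hoob : ¬ anInR ks cs i) :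
    ¬(anGet cs 0 - 1 ≤ anGet ks 0 ∧ anGet ks 0 < anGet cs 0 + 2 ∧
      anGet cs 1 - 1 ≤ anGet ks 1 ∧ anGet ks 1 < anGet cs 1 + 2 ∧
      anGet cs 2 - 1 ≤ anGet ks 2 ∧ anGet ks 2 < anGet cs 2 + 2 ∧
      anGet cs 3 - 1 ≤ anGet ks 3 ∧ anGet ks 3 < anGet cs 3 + 2) := by
  intro hcond
  apply hoob
  unfold anInR
  rw [anGetD0 cs, anGetD0 ks, anGetD1 cs, anGetD1 ks, anGetD2 cs, anGetD2 ks,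
    anGetD3 cs, anGetD3 ks] at hcond
  interval_cases i <;> omega

-- first-match dict lookup on distinct keys returns exactly the stored value
theorem getD_mk_true_iff (state : List (List Int × Bool)) (k : List Int)
    (hnd : (state.map Prod.fst).Nodup) :
    ((PySem.Dict.mk state).getD k false = true) ↔ (k, true) ∈ state := by
  have hkeys : (PySem.Dict.mk state).keys.Nodup := hnd
  rw [PySem.Dict.getD_eq_get?_getD]
  cases h : (PySem.Dict.mk state).get? k with
  | none =>
    simp only [Option.getD_none, Bool.false_eq_true, false_iff]
    intro hmem
    have := PySem.Dict.get?_of_mem_items (d := PySem.Dict.mk state) hmem hkeys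
    rw [h] at this
    simp at this
  | some v =>
    simp only [Option.getD_some]
    constructor
    · intro hv; subst hv
      exact PySem.Dict.mem_items_of_get?_eq_some _ h
    · intro hmem
      have := PySem.Dict.get?_of_mem_items (d := PySem.Dict.mk state) hmem hkeys
      rw [h] at this
      injection this

theorem countP_mem_comm {α : Type} [BEq α] [LawfulBEq α] (l₁ l₂ : List α)
    (h₁ : l₁.Nodup) (h₂ : l₂.Nodup) :
    l₁.countP (fun a => decide (a ∈ l₂)) = l₂.countP (fun a => decide (a ∈ l₁)) := by
  letI : DecidableEq α := fun a b => decidable_of_iff (a == b) beq_iff_eq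
  rw [List.countP_eq_length_filter, List.countP_eq_length_filter]
  rw [← List.toFinset_card_of_nodup (h₁.filter _), ← List.toFinset_card_of_nodup (h₂.filter _)]
  congr 1
  apply Finset.ext
  intro a
  simp only [List.mem_toFinset, List.mem_filter, decide_eq_true_eq]
  tauto

-- 4D coord: both sides count the true entries of the 3×3×3×3 box minus the centre
theorem active_neighbors_4_aux4 (state : List (List Int × Bool)) (x y z w : Int) (r : List Int)
    (hC : ∀ p ∈ state,
      (p.1.length = 4 ∧ 4 ≤ (x::y::z::w::r).length) ∨
      (∃ i < min (min p.1.length (x::y::z::w::r).length) 4, ¬ anInR p.1 (x::y::z::w::r) i))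
    (hnd : (state.map Prod.fst).Nodup) :
    active_neighbors_4 state (x::y::z::w::r) = active_neighbors_4_alt state (x::y::z::w::r) := by
  have e0 : anGet (x::y::z::w::r) 0 = x := by rw [anGetD0]; rfl
  have e1 : anGet (x::y::z::w::r) 1 = y := by rw [anGetD1]; rfl
  have e2 : anGet (x::y::z::w::r) 2 = z := by rw [anGetD2]; rfl
  have e3 : anGet (x::y::z::w::r) 3 = w := by rw [anGetD3]; rfl
  -- A's loop = count of state entries that are true neighbor cells
  have hA : active_neighbors_4 state (x::y::z::w::r) =
      ((state.countP fun p => decide (p.2 = true ∧ p.1 ∈ nbrKeys x y z w)) : Int) := by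
    unfold active_neighbors_4
    rw [PySem.List.foldl_congr_mem
      (g := fun neighbors p => if p.2 = true ∧ p.1 ∈ nbrKeys x y z w then neighbors + 1 else neighbors)]
    · rw [PySem.List.foldl_ite_add_one]; simp
    · intro acc p hp
      rcases hC p hp with ⟨h4, -⟩ | ⟨i, hi, hoob⟩
      · -- a genuine 4D key
        obtain ⟨k, v⟩ := p
        match k, h4 with
        | [k0, k1, k2, k3], _ =>
          have hget : ((PySem.Dict.mk state).get? [k0, k1, k2, k3]).getD false = v := by
            rw [PySem.Dict.get?_of_mem_items (d := PySem.Dict.mk state) hp hnd]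
            rfl
          have f0 : anGet [k0, k1, k2, k3] 0 = k0 := by rw [anGetD0]; rfl
          have f1 : anGet [k0, k1, k2, k3] 1 = k1 := by rw [anGetD1]; rfl
          have f2 : anGet [k0, k1, k2, k3] 2 = k2 := by rw [anGetD2]; rfl
          have f3 : anGet [k0, k1, k2, k3] 3 = k3 := by rw [anGetD3]; rfl
          simp only [e0, e1, e2, e3, f0, f1, f2, f3, hget]
          by_cases hmem : [k0, k1, k2, k3] ∈ nbrKeys x y z w
          · have hm := (mem_nbrKeys x y z w k0 k1 k2 k3).mp hmem
            rw [if_pos (by omega), if_neg (by omega)]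
            have hiff : (v = true ∧ [k0, k1, k2, k3] ∈ nbrKeys x y z w) ↔ (v = true) := by
              constructor
              · exact fun h => h.1
              · exact fun h => ⟨h, hmem⟩
            rw [if_congr hiff rfl rfl]
          · have hiff : (v = true ∧ [k0, k1, k2, k3] ∈ nbrKeys x y z w) ↔ False := by
              simp [hmem]
            rw [if_congr hiff rfl rfl, if_neg not_false]
            by_cases hr : x - 1 ≤ k0 ∧ k0 < x + 2 ∧ y - 1 ≤ k1 ∧ k1 < y + 2 ∧
                z - 1 ≤ k2 ∧ k2 < z + 2 ∧ w - 1 ≤ k3 ∧ k3 < w + 2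
            · rw [if_pos hr, if_pos (by
                by_contra hne
                exact hmem ((mem_nbrKeys x y z w k0 k1 k2 k3).mpr ⟨hr, fun hq => hne (by omega)⟩))]
            · rw [if_neg hr]
      · -- a key failing a range test at a valid index: skipped by both
        have hik : i < p.1.length := by omega
        have hi4 : i < 4 := by omega
        rw [if_neg (bigcond_false (x::y::z::w::r) p.1 i hik (by simp; omega) hi4 hoob),
          if_neg (by
            rintro ⟨-, hmem⟩
            exact not_mem_nbrKeys_of_oob x y z w r p.1 i hik hi4 hoob hmem)]
  -- B = count of neighbor keys whose cell is stored true
  have hB : active_neighbors_4_alt state (x::y::z::w::r) =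
      (((nbrKeys x y z w).countP fun k => decide ((k, true) ∈ state)) : Int) := by
    unfold active_neighbors_4_alt
    have hmap : ((nbrKeys x y z w).countP fun k => decide ((k, true) ∈ state))
        = anOffsets.countP ((fun k => decide ((k, true) ∈ state)) ∘
            fun δ => [x + δ.1, y + δ.2.1, z + δ.2.2.1, w + δ.2.2.2]) := by
      rw [nbrKeys, List.countP_map]
    rw [hmap]
    congr 1
    apply List.countP_congr
    intro δ hδ
    rw [zipWith_four]
    simp only [Function.comp_apply, decide_eq_true_eq]
    exact getD_mk_true_iff state _ hnd
  rw [hA, hB]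
  congr 1
  -- symmetric-intersection counting: |{true keys} ∩ {neighbor keys}| both ways
  have hstep : (state.countP fun p => decide (p.2 = true ∧ p.1 ∈ nbrKeys x y z w))
      = ((state.filter (fun p => p.2)).map Prod.fst).countP (fun k => decide (k ∈ nbrKeys x y z w)) := by
    rw [List.countP_map, List.countP_filter]
    apply List.countP_congr
    intro p _
    cases hp2 : p.2 <;> by_cases h1 : p.1 ∈ nbrKeys x y z w <;>
      simp [Function.comp, h1]
  have hT : (((state.filter (fun p => p.2)).map Prod.fst)).Nodup :=
    hnd.sublist (List.Sublist.map Prod.fst (List.filter_sublist (l := state)))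
  have hcomm := countP_mem_comm ((state.filter (fun p => p.2)).map Prod.fst) (nbrKeys x y z w)
    hT (nodup_nbrKeys x y z w)
  rw [hstep]
  refine hcomm.trans (List.countP_congr ?_)
  intro k hk
  simp only [decide_eq_true_eq]
  constructor
  · intro hkT
    obtain ⟨p, hp, hfst⟩ := List.mem_map.mp hkT
    obtain ⟨hps, hpt⟩ := List.mem_filter.mp hp
    obtain ⟨p1, p2⟩ := p
    simp only at hfst
    subst hfst
    cases p2
    · simp at hpt
    · exact hps
  · intro hmem
    exact List.mem_map.mpr ⟨(k, true), List.mem_filter.mpr ⟨hmem, by simp⟩, rfl⟩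

-- short coord: every admitted key fails a range test, so both sides are 0
theorem active_neighbors_4_aux0 (state : List (List Int × Bool)) (coord : List Int)
    (hlt : coord.length < 4)
    (hC : ∀ p ∈ state,
      (p.1.length = 4 ∧ 4 ≤ coord.length) ∨
      (∃ i < min (min p.1.length coord.length) 4, ¬ anInR p.1 coord i))
    (hnd : (state.map Prod.fst).Nodup) :
    active_neighbors_4 state coord = active_neighbors_4_alt state coord := by
  have hA : active_neighbors_4 state coord = 0 := by
    unfold active_neighbors_4
    rw [PySem.List.foldl_congr_mem (g := fun acc _ => acc)]
    · exact PySem.List.foldl_ignore state 0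
    · intro acc p hp
      rcases hC p hp with ⟨-, h4⟩ | ⟨i, hi, hoob⟩
      · omega
      · exact if_neg (bigcond_false coord p.1 i (by omega) (by omega) (by omega) hoob)
  have hB : active_neighbors_4_alt state coord = 0 := by
    unfold active_neighbors_4_alt
    rw [Nat.cast_eq_zero, List.countP_eq_zero]
    intro δ hδ hp
    have htrue : (PySem.Dict.mk state).getD
        (List.zipWith (· + ·) coord [δ.1, δ.2.1, δ.2.2.1, δ.2.2.2]) false = true := hp
    have hmem := (getD_mk_true_iff state _ hnd).mp htrue
    rcases hC _ hmem with ⟨h4, hc4⟩ | ⟨i, hi, hoob⟩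
    · omega
    · -- the looked-up key satisfies every range test it has indices for
      apply hoob
      have hlen : (List.zipWith (· + ·) coord [δ.1, δ.2.1, δ.2.2.1, δ.2.2.2]).length
          = min coord.length 4 := by simp [List.length_zipWith]
      have hic : i < coord.length := by
        simp only [hlen] at hi; omega
      have hi4 : i < 4 := by omega
      have hkey : (List.zipWith (· + ·) coord [δ.1, δ.2.1, δ.2.2.1, δ.2.2.2]).getD i 0
          = coord[i] + [δ.1, δ.2.1, δ.2.2.1, δ.2.2.2].getD i 0 := by
        rw [List.getD_eq_getElem _ _ (by omega), List.getElem_zipWith,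
          List.getD_eq_getElem _ _ (by simpa using hi4)]
      rw [mem_anOffsets] at hδ
      obtain ⟨ha, hb, hc, hd, -⟩ := hδ
      unfold anInR
      rw [hkey, List.getD_eq_getElem _ _ hic]
      interval_cases i <;> simp only [List.getD] <;> simp <;> omega
  rw [hA, hB]

-- ===== VERDICT (by name: the statement is the Claim_ definition above) =====
theorem active_neighbors_4_spec : Claim_equal_active_neighbors_4 := by
  intro state coord _ hpre
  obtain ⟨hC, hnd⟩ := hpre
  match coord with
  | x::y::z::w::r => exact active_neighbors_4_aux4 state x y z w r hC hnd
  | [] => exact active_neighbors_4_aux0 state [] (by simp) hC hnd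
  | [a] => exact active_neighbors_4_aux0 state [a] (by simp) hC hnd
  | [a, b] => exact active_neighbors_4_aux0 state [a, b] (by simp) hC hnd
  | [a, b, c] => exact active_neighbors_4_aux0 state [a, b, c] (by simp) hC hnd
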